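-- pv_equiv track=rewrite | github.com/iljungr/ORBL_tools | IntervalUtils.py | remove_final_codon
-- ===== SOURCE A (Python) =====
-- def remove_final_codon(intervals, strand) :
--     """ Return intervals with final codon removed """
--     intervals = list(intervals) # To avoid changing original.
--     for ii in range(3) :
--         if len(intervals) == 0 :
--             break
--         if strand == '-' :
--             intervals[0] = [intervals[0][0] + 1, intervals[0][1]] # Don't change original
--             if intervals[0][0] > intervals[0][1] :
--                 del intervals[0]
--         else :
--             intervals[-1] = [intervals[-1][0], intervals[-1][1] - 1] # Don't change orig
--             if intervals[-1][1] < intervals[-1][0] :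
--                 del intervals[-1]
--     return intervals
-- ===== SOURCE B (Python) =====
-- def remove_final_codon(intervals, strand):
--     """ Return intervals with final codon removed """
--     if strand == '-':
--         return _trim_front(3, list(intervals))
--     return _trim_back_rev(3, intervals[::-1])[::-1]
--
-- def _trim_front(remaining, ivs):
--     # Consume `remaining` bases from the front, whole intervals at a time.
--     if remaining == 0 or not ivs:
--         return ivs
--     a, b = ivs[0][0], ivs[0][1]
--     size = b - a + 1
--     if size <= remaining:
--         return _trim_front(remaining - size, ivs[1:])
--     return [[a + remaining, b]] + ivs[1:]
--
-- def _trim_back_rev(remaining, ivs_rev):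
--     # Same walk on the back-to-front list, shortening at the high endpoint.
--     if remaining == 0 or not ivs_rev:
--         return ivs_rev
--     a, b = ivs_rev[0][0], ivs_rev[0][1]
--     size = b - a + 1
--     if size <= remaining:
--         return _trim_back_rev(remaining - size, ivs_rev[1:])
--     return [[a, b - remaining]] + ivs_rev[1:]
-- ===== Notes on version B (the rewrite author's own statement) =====
-- stated objective: alternative
-- what changed: Replaces A's fixed three-iteration one-base-at-a-time trimming loop with a budgeted whole-interval scan (delete or shorten each end interval in one step by subtracting its size from a budget of 3); Pre_ excludes inputs whose up-to-3 end intervals are not proper pairs (fewer than 2 endpoints, on which A raises IndexError, or start > end, whose consumption as one whole per-base iteration is an accident of A's loop).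
-- outside the precondition, e.g. on remove_final_codon([[1, 0], [1, 0], [1, 0], [5, 9]], '-'): A returns [[5, 9]], B returns [[8, 9]]; on remove_final_codon([[5, 2]], '+'): A returns [], B returns []
import Mathlib
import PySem

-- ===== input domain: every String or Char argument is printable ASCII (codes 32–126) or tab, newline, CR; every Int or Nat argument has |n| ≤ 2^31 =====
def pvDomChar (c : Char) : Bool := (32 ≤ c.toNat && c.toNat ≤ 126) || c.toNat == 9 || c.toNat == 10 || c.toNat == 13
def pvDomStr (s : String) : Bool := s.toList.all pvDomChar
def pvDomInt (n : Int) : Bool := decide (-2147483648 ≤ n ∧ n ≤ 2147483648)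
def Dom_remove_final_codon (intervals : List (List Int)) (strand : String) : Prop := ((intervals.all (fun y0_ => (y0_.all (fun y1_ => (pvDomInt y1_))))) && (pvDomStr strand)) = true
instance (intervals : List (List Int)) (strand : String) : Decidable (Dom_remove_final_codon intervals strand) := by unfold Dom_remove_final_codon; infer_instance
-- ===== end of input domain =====

-- B trims the final codon by a budgeted whole-interval scan from the trimmed end
-- (delete or shorten each end interval in one step) instead of A's three
-- one-base-per-iteration loop; objective: alternative decomposition, same cost.

-- ===== PORT A =====
-- one iteration of A's `for ii in range(3)` body (the `.getD` defaults are unreachable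
-- under Pre_, which guarantees every touched interval has both endpoints)
def pvStepA (intervals : List (List Int)) (strand : String) : List (List Int) :=
  if intervals.length = 0 then intervals            -- `break`: all later iterations are no-ops too
  else if strand = "-" then
    let iv := ((PySem.List.pyGet? intervals 0).getD [])
    let a := ((PySem.List.pyGet? iv 0).getD 0)
    let b := ((PySem.List.pyGet? iv 1).getD 0)
    let intervals' := [a + 1, b] :: intervals.tail  -- intervals[0] = [intervals[0][0]+1, intervals[0][1]]
    if b < a + 1 then intervals'.tail else intervals'   -- del intervals[0]
  else
    let iv := ((PySem.List.pyGet? intervals (-1)).getD [])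
    let a := ((PySem.List.pyGet? iv 0).getD 0)
    let b := ((PySem.List.pyGet? iv 1).getD 0)
    let intervals' := intervals.dropLast ++ [[a, b - 1]]  -- intervals[-1] = [...]
    if b - 1 < a then intervals'.dropLast else intervals' -- del intervals[-1]

def remove_final_codon (intervals : List (List Int)) (strand : String) : List (List Int) :=
  (List.range 3).foldl (fun acc _ => pvStepA acc strand) intervals

-- ===== PORT B =====
def trimFront (remaining : Int) (ivs : List (List Int)) : List (List Int) :=
  match ivs with
  | [] => ivs
  | iv :: rest =>
    if remaining = 0 then ivs
    else
      let a := ((PySem.List.pyGet? iv 0).getD 0)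
      let b := ((PySem.List.pyGet? iv 1).getD 0)
      let size := b - a + 1
      if size ≤ remaining then trimFront (remaining - size) rest
      else [a + remaining, b] :: rest

def trimBackRev (remaining : Int) (ivsRev : List (List Int)) : List (List Int) :=
  match ivsRev with
  | [] => ivsRev
  | iv :: rest =>
    if remaining = 0 then ivsRev
    else
      let a := ((PySem.List.pyGet? iv 0).getD 0)
      let b := ((PySem.List.pyGet? iv 1).getD 0)
      let size := b - a + 1
      if size ≤ remaining then trimBackRev (remaining - size) rest
      else [a, b - remaining] :: rest

def remove_final_codon_alt (intervals : List (List Int)) (strand : String) : List (List Int) :=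
  if strand = "-" then trimFront 3 intervals
  else (trimBackRev 3 intervals.reverse).reverse

-- ===== PRECONDITION & SPEC =====
-- helpers naming the interval shape Pre_ talks about
def pvSize (iv : List Int) : Int :=
  ((PySem.List.pyGet? iv 1).getD 0) - ((PySem.List.pyGet? iv 0).getD 0) + 1
def pvOkB (iv : List Int) : Bool :=
  decide (2 ≤ iv.length) && decide (((PySem.List.pyGet? iv 0).getD 0) ≤ ((PySem.List.pyGet? iv 1).getD 0))
-- the end intervals a 3-base trim can touch must be proper ordered pairs
def pvZone3 (zone : List (List Int)) : Bool :=
  match zone with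
  | [] => true
  | [z0] => pvOkB z0
  | [z0, z1] => pvOkB z0 && (decide (3 ≤ pvSize z0) || pvOkB z1)
  | z0 :: z1 :: z2 :: _ =>
      pvOkB z0 && (decide (3 ≤ pvSize z0) ||
        (pvOkB z1 && (decide (3 ≤ pvSize z0 + pvSize z1) || pvOkB z2)))

-- Pre_ restricts to the natural domain at the trimmed end: each end interval the 3-base
-- trim needs must be a proper pair (both endpoints present, start ≤ end). Excluded are
-- inputs on which A raises IndexError (a needed interval with fewer than 2 endpoints)
-- and inputs with an inverted interval (start > end) in the trimmed zone, whose
-- consumption as exactly one whole trimming iteration is an accident of A's per-base loop.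
def Pre_remove_final_codon (intervals : List (List Int)) (strand : String) : Prop :=
  pvZone3 (if strand = "-" then intervals else intervals.reverse) = true
instance (intervals : List (List Int)) (strand : String) : Decidable (Pre_remove_final_codon intervals strand) := by unfold Pre_remove_final_codon; infer_instance
def pvWitness_remove_final_codon : List (List Int) × String := ([[1, 10]], "+")

def Spec_remove_final_codon (intervals : List (List Int)) (strand : String) (out : List (List Int)) : Prop := out = remove_final_codon_alt intervals strand
instance (intervals : List (List Int)) (strand : String) (out : List (List Int)) : Decidable (Spec_remove_final_codon intervals strand out) := by unfold Spec_remove_final_codon; infer_instance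

-- ===== CLAIM (what is proved, stated in full; the proofs are below) =====
def Claim_equal_remove_final_codon : Prop := ∀ (intervals : List (List Int)) (strand : String), Dom_remove_final_codon intervals strand → Pre_remove_final_codon intervals strand → Spec_remove_final_codon intervals strand (remove_final_codon intervals strand)

-- ===== LEMMAS AND PROOFS =====

-- loop invariant: with budget n, every interval the trim still needs is a proper pair
def pvZoneOK : Nat → List (List Int) → Prop
  | 0, _ => True
  | _+1, [] => True
  | n+1, iv :: rest => pvOkB iv = true ∧ pvZoneOK ((n+1) - (pvSize iv).toNat) rest

lemma pvZoneOK_nil (m : Nat) : pvZoneOK m [] := by cases m <;> trivial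

lemma pvZoneOK_zero (l : List (List Int)) : pvZoneOK 0 l := by cases l <;> trivial

-- proof helper: A's range(3) loop as step-first Nat recursion
def pvIter (strand : String) : Nat → List (List Int) → List (List Int)
  | 0, ivs => ivs
  | n+1, ivs => pvIter strand n (pvStepA ivs strand)

lemma remove_eq_iter (intervals : List (List Int)) (strand : String) :
    remove_final_codon intervals strand = pvIter strand 3 intervals := by
  simp [remove_final_codon, pvIter, List.range_succ]

lemma stepA_nil (strand : String) : pvStepA [] strand = [] := by
  simp [pvStepA]

lemma stepA_neg_cons (a b : Int) (t : List Int) (rest : List (List Int)) :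
    pvStepA ((a::b::t) :: rest) "-" = if b < a + 1 then rest else [a+1,b] :: rest := by
  simp [pvStepA, PySem.List.pyGet?_zero_cons]

lemma stepA_pos_concat (a b : Int) (t : List Int) (xs : List (List Int)) (strand : String)
    (hs : strand ≠ "-") :
    pvStepA (xs ++ [a::b::t]) strand = if b - 1 < a then xs else xs ++ [[a, b-1]] := by
  simp [pvStepA, hs, PySem.List.pyGet?_neg_one_append_singleton, PySem.List.pyGet?_zero_cons]

lemma stepA_pos_rev (a b : Int) (t : List Int) (rxs : List (List Int)) (strand : String)
    (hs : strand ≠ "-") :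
    (pvStepA (((a::b::t) :: rxs).reverse) strand).reverse =
      if b - 1 < a then rxs else [[a, b-1]] ++ rxs := by
  rw [show ((a::b::t) :: rxs).reverse = rxs.reverse ++ [a::b::t] by simp,
      stepA_pos_concat _ _ _ _ _ hs]
  by_cases hc : b - 1 < a
  · simp [hc]
  · simp [hc]

lemma pyGet01 (a b : Int) (t : List Int) :
    ((PySem.List.pyGet? (a::b::t) 0).getD 0) = a ∧ ((PySem.List.pyGet? (a::b::t) 1).getD 0) = b := by
  constructor
  · rw [PySem.List.pyGet?_zero_cons]; rfl
  · rw [show (1:Int) = ((0:Nat):Int)+1 by norm_num, PySem.List.pyGet?_cons_succ,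
        Nat.cast_zero, PySem.List.pyGet?_zero_cons]; rfl

lemma pvSize_cons (a b : Int) (t : List Int) : pvSize (a::b::t) = b - a + 1 := by
  simp [pvSize, (pyGet01 a b t).1, (pyGet01 a b t).2]

lemma pvOkB_cons (a b : Int) (t : List Int) : pvOkB (a::b::t) = true ↔ a ≤ b := by
  simp [pvOkB, (pyGet01 a b t).1, (pyGet01 a b t).2]

lemma pvOkB_shape (iv : List Int) (h : pvOkB iv = true) :
    ∃ a b t, iv = a :: b :: t ∧ a ≤ b := by
  match iv with
  | [] => simp [pvOkB] at h
  | [x] => simp [pvOkB] at h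
  | a :: b :: t =>
    exact ⟨a, b, t, rfl, (pvOkB_cons a b t).mp h⟩

lemma trimFront_cons (n : Int) (a b : Int) (t : List Int) (rest : List (List Int)) (hn : n ≠ 0) :
    trimFront n ((a::b::t) :: rest) =
      if b - a + 1 ≤ n then trimFront (n - (b - a + 1)) rest
      else [a + n, b] :: rest := by
  rw [trimFront]
  simp [hn, (pyGet01 a b t).1, (pyGet01 a b t).2]

lemma trimBackRev_cons (n : Int) (a b : Int) (t : List Int) (rest : List (List Int)) (hn : n ≠ 0) :
    trimBackRev n ((a::b::t) :: rest) =
      if b - a + 1 ≤ n then trimBackRev (n - (b - a + 1)) rest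
      else [a, b - n] :: rest := by
  rw [trimBackRev]
  simp [hn, (pyGet01 a b t).1, (pyGet01 a b t).2]

lemma trimFront_zero (ivs : List (List Int)) : trimFront 0 ivs = ivs := by
  cases ivs with
  | nil => rfl
  | cons iv rest => rw [trimFront]; simp

lemma trimBackRev_zero (ivs : List (List Int)) : trimBackRev 0 ivs = ivs := by
  cases ivs with
  | nil => rfl
  | cons iv rest => rw [trimBackRev]; simp

lemma front_step (n : Nat) (a b : Int) (t : List Int) (rest : List (List Int)) (hab : a ≤ b) :
    trimFront ((n:Int)+1) ((a::b::t) :: rest) = trimFront n (pvStepA ((a::b::t) :: rest) "-") := by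
  rw [stepA_neg_cons, trimFront_cons _ _ _ _ _ (by omega)]
  by_cases hc : b < a + 1
  · have hb : b = a := by omega
    subst hb
    rw [if_pos hc, if_pos (by omega)]
    norm_num
  · rw [if_neg hc]
    by_cases hn : n = 0
    · subst hn
      rw [if_neg (by omega), Nat.cast_zero, trimFront_zero]
      norm_num
    · rw [trimFront_cons _ _ _ _ _ (by exact_mod_cast hn)]
      by_cases hle : (b - a + 1 : Int) ≤ ((n:Int) + 1)
      · rw [if_pos hle, if_pos (by omega)]
        have : (n:Int) + 1 - (b - a + 1) = (n:Int) - (b - (a+1) + 1) := by ring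
        rw [this]
      · rw [if_neg hle, if_neg (by omega)]
        have : a + ((n:Int) + 1) = a + 1 + (n : Int) := by ring
        rw [this]

lemma back_step (n : Nat) (a b : Int) (t : List Int) (rest : List (List Int)) (strand : String)
    (hs : strand ≠ "-") (hab : a ≤ b) :
    trimBackRev ((n:Int)+1) ((a::b::t) :: rest) =
      trimBackRev n ((pvStepA ((a::b::t) :: rest).reverse strand).reverse) := by
  rw [stepA_pos_rev _ _ _ _ _ hs, trimBackRev_cons _ _ _ _ _ (by omega)]
  by_cases hc : b - 1 < a
  · have hb : b = a := by omega
    subst hb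
    rw [if_pos hc, if_pos (by omega)]
    norm_num
  · rw [if_neg hc]
    by_cases hn : n = 0
    · subst hn
      rw [if_neg (by omega), List.singleton_append, Nat.cast_zero, trimBackRev_zero]
      norm_num
    · rw [List.singleton_append, trimBackRev_cons _ _ _ _ _ (by exact_mod_cast hn)]
      by_cases hle : (b - a + 1 : Int) ≤ ((n:Int) + 1)
      · rw [if_pos hle, if_pos (by omega)]
        have : (n:Int) + 1 - (b - a + 1) = (n:Int) - (b - 1 - a + 1) := by ring
        rw [this]
      · rw [if_neg hle, if_neg (by omega)]
        have : b - ((n:Int) + 1) = b - 1 - (n : Int) := by ring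
        rw [this]

-- the invariant survives one trimming step on the '-' front
lemma zoneOK_step_front (n : Nat) (a b : Int) (t : List Int) (rest : List (List Int))
    (hab : a ≤ b) (h : pvZoneOK (n+1) ((a::b::t) :: rest)) :
    pvZoneOK n (pvStepA ((a::b::t) :: rest) "-") := by
  have htail := h.2
  rw [pvSize_cons] at htail
  rw [stepA_neg_cons]
  by_cases hc : b < a + 1
  · rw [if_pos hc]
    have : (n+1) - (b - a + 1).toNat = n := by omega
    rwa [this] at htail
  · rw [if_neg hc]
    cases n with
    | zero => trivial
    | succ m =>
      refine ⟨(pvOkB_cons (a+1) b []).mpr (by omega), ?_⟩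
      rw [pvSize_cons]
      have : (m+1) - (b - (a+1) + 1).toNat = (m+1+1) - (b - a + 1).toNat := by omega
      rwa [this]

-- the invariant survives one trimming step at the '+' end (reversed view)
lemma zoneOK_step_back (n : Nat) (a b : Int) (t : List Int) (rest : List (List Int))
    (strand : String) (hs : strand ≠ "-") (hab : a ≤ b)
    (h : pvZoneOK (n+1) ((a::b::t) :: rest)) :
    pvZoneOK n ((pvStepA ((a::b::t) :: rest).reverse strand).reverse) := by
  have htail := h.2
  rw [pvSize_cons] at htail
  rw [stepA_pos_rev _ _ _ _ _ hs]
  by_cases hc : b - 1 < a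
  · rw [if_pos hc]
    have : (n+1) - (b - a + 1).toNat = n := by omega
    rwa [this] at htail
  · rw [if_neg hc]
    cases n with
    | zero => trivial
    | succ m =>
      refine ⟨(pvOkB_cons a (b-1) []).mpr (by omega), ?_⟩
      rw [pvSize_cons]
      have : (m+1) - (b - 1 - a + 1).toNat = (m+1+1) - (b - a + 1).toNat := by omega
      rwa [this]

lemma front_main (n : Nat) (ivs : List (List Int)) (h : pvZoneOK n ivs) :
    pvIter "-" n ivs = trimFront n ivs := by
  induction n generalizing ivs with
  | zero => simp [pvIter, trimFront_zero]
  | succ n ih =>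
    cases ivs with
    | nil =>
      rw [show pvIter "-" (n+1) [] = pvIter "-" n [] by simp [pvIter, stepA_nil],
          ih [] (pvZoneOK_nil n)]
      rfl
    | cons iv rest =>
      obtain ⟨a, b, t, rfl, hab⟩ := pvOkB_shape iv h.1
      rw [show pvIter "-" (n+1) ((a::b::t) :: rest) =
            pvIter "-" n (pvStepA ((a::b::t) :: rest) "-") from rfl,
          show (((n:Nat)+1 : Nat) : Int) = (n:Int)+1 by push_cast; ring,
          front_step n a b t rest hab]
      exact ih _ (zoneOK_step_front n a b t rest hab h)

lemma back_main (n : Nat) (rvs : List (List Int)) (strand : String) (hs : strand ≠ "-")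
    (h : pvZoneOK n rvs) :
    (pvIter strand n rvs.reverse).reverse = trimBackRev n rvs := by
  induction n generalizing rvs with
  | zero => simp [pvIter, trimBackRev_zero]
  | succ n ih =>
    cases rvs with
    | nil =>
      rw [show pvIter strand (n+1) ([] : List (List Int)).reverse = pvIter strand n [] by
            simp [pvIter, stepA_nil]]
      have := ih [] (pvZoneOK_nil n)
      simp at this
      simp [this]
      rfl
    | cons iv rest =>
      obtain ⟨a, b, t, rfl, hab⟩ := pvOkB_shape iv h.1
      rw [show pvIter strand (n+1) ((a::b::t) :: rest).reverse =
            pvIter strand n (pvStepA ((a::b::t) :: rest).reverse strand) from rfl,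
          show (((n:Nat)+1 : Nat) : Int) = (n:Int)+1 by push_cast; ring,
          back_step n a b t rest strand hs hab]
      have := ih ((pvStepA ((a::b::t) :: rest).reverse strand).reverse)
        (zoneOK_step_back n a b t rest strand hs hab h)
      rw [List.reverse_reverse] at this
      exact this

-- Pre_'s explicit case formula implies the budget-3 invariant
lemma zone3_imp (zone : List (List Int)) (h : pvZone3 zone = true) : pvZoneOK 3 zone := by
  match zone with
  | [] => trivial
  | [z0] =>
    simp [pvZone3] at h
    exact ⟨h, pvZoneOK_nil _⟩
  | [z0, z1] =>
    simp [pvZone3] at h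
    obtain ⟨a, b, t, rfl, hab⟩ := pvOkB_shape z0 h.1
    refine ⟨h.1, ?_⟩
    rw [pvSize_cons]
    rcases h.2 with h3 | hok
    · rw [pvSize_cons] at h3
      have : 3 - (b - a + 1).toNat = 0 := by omega
      rw [this]; trivial
    · cases hk : 3 - (b - a + 1).toNat with
      | zero => trivial
      | succ m => exact ⟨hok, pvZoneOK_nil _⟩
  | z0 :: z1 :: z2 :: zr =>
    simp only [pvZone3, Bool.and_eq_true, Bool.or_eq_true, decide_eq_true_eq] at h
    obtain ⟨a, b, t, rfl, hab⟩ := pvOkB_shape z0 h.1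
    refine ⟨h.1, ?_⟩
    rw [pvSize_cons]
    rcases h.2 with h3 | ⟨hok1, h2⟩
    · rw [pvSize_cons] at h3
      have : 3 - (b - a + 1).toNat = 0 := by omega
      rw [this]; trivial
    · obtain ⟨a1, b1, t1, rfl, hab1⟩ := pvOkB_shape z1 hok1
      cases hk : 3 - (b - a + 1).toNat with
      | zero => trivial
      | succ m =>
        refine ⟨hok1, ?_⟩
        rw [pvSize_cons]
        rcases h2 with h23 | hok2
        · rw [pvSize_cons, pvSize_cons] at h23
          have : (m+1) - (b1 - a1 + 1).toNat = 0 := by omega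
          rw [this]; trivial
        · cases hk2 : (m+1) - (b1 - a1 + 1).toNat with
          | zero => trivial
          | succ m2 =>
            obtain ⟨a2, b2, t2, rfl, hab2⟩ := pvOkB_shape z2 hok2
            refine ⟨hok2, ?_⟩
            rw [pvSize_cons]
            have hz : (m2+1) - (b2 - a2 + 1).toNat = 0 := by omega
            rw [hz]
            exact pvZoneOK_zero zr

-- ===== VERDICT (by name: the statement is the Claim_ definition above) =====
theorem remove_final_codon_spec : Claim_equal_remove_final_codon := by
  intro intervals strand _hdom hpre
  unfold Spec_remove_final_codon remove_final_codon_alt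
  rw [remove_eq_iter]
  unfold Pre_remove_final_codon at hpre
  by_cases hs : strand = "-"
  · subst hs
    rw [if_pos rfl] at hpre ⊢
    have := front_main 3 intervals (zone3_imp _ hpre)
    norm_num at this
    exact this
  · rw [if_neg hs] at hpre ⊢
    have := back_main 3 intervals.reverse strand hs (zone3_imp _ hpre)
    rw [List.reverse_reverse] at this
    norm_num at this
    rw [← this, List.reverse_reverse]
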